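-- pv_equiv track=rewrite | github.com/InnovAnon-Inc/HafrenHaver | music2/HH/cadence.py | cadence_helper3
-- ===== SOURCE A (Python) =====
-- def cadence_helper3 (mapping):
-- 	mapuniq = {}
-- 	normndx = 0
-- 	for short, phrases in mapping.items (): # normalize indices
-- 		for phrase in phrases:
-- 			for ndx in phrase:
-- 				if ndx in mapuniq: continue
-- 				mapuniq[ndx] = normndx
-- 				normndx = normndx + 1
-- 	print ("mapuniq: %s" % mapuniq)
-- 	return mapuniq
-- ===== SOURCE B (Python) =====
-- def cadence_helper3(mapping):
-- 	# First-occurrence-position algorithm: scan the flattened indices in REVERSE,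
-- 	# overwriting, so each index ends up mapped to its earliest position; then
-- 	# sort the unique indices by that position and number them.
-- 	flat = [ndx for phrases in mapping.values() for phrase in phrases for ndx in phrase]
-- 	first = {}
-- 	for pos, ndx in reversed(list(enumerate(flat))):
-- 		first[ndx] = pos
-- 	mapuniq = {}
-- 	for i, ndx in enumerate(sorted(first, key=first.get)):
-- 		mapuniq[ndx] = i
-- 	print("mapuniq: %s" % mapuniq)
-- 	return mapuniq
-- ===== Notes on version B (the rewrite author's own statement) =====
-- stated objective: alternative
-- what changed: Replaces A's single skip-if-seen pass that grows a dict and a counter in lockstep with a first-occurrence-position algorithm: a reverse overwrite pass records each index's earliest position, then the unique indices are sorted by that position and numbered.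
import Mathlib
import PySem

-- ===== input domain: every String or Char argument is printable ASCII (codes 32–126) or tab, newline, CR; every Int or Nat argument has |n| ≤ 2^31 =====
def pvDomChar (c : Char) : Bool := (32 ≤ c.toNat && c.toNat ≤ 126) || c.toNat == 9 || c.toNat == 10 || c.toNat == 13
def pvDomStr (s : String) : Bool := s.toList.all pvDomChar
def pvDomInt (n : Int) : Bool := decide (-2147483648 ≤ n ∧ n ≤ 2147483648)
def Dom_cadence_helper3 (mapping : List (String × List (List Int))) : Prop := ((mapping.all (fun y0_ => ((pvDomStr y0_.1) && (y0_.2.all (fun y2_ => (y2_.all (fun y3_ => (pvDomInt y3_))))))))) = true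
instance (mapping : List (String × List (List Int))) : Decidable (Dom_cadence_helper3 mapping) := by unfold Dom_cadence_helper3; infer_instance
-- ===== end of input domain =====

-- B replaces A's skip-if-seen counter loop by a different algorithm: a reverse overwrite pass that maps
-- each index to its FIRST occurrence position, then a sort by that position and numbering (objective:
-- alternative). The print side effect is reproduced identically; equivalence is about the returned dict.


-- ===== PORT A =====
-- innermost loop body: 'if ndx in mapuniq: continue; mapuniq[ndx] = normndx; normndx += 1'
def cadStepA (st : PySem.Dict Int Int × Int) (ndx : Int) : PySem.Dict Int Int × Int :=
  if st.1.contains ndx then st else (st.1.insert ndx st.2, st.2 + 1)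

def cadence_helper3 (mapping : List (String × List (List Int))) : List (Int × Int) :=
  -- mapuniq = {}; normndx = 0; triple-nested for loop over mapping.items()/phrases/phrase
  let st := mapping.foldl
    (fun st sp => sp.2.foldl (fun st phrase => phrase.foldl cadStepA st) st)
    (PySem.Dict.empty, 0)
  st.1.items

-- ===== PORT B =====
def cadence_helper3_alt (mapping : List (String × List (List Int))) : List (Int × Int) :=
  -- flat = [ndx for phrases in mapping.values() for phrase in phrases for ndx in phrase]
  let flat := ((mapping.map (fun sp => sp.2)).flatten).flatten
  -- for pos, ndx in reversed(list(enumerate(flat))): first[ndx] = pos   (overwrite keeps the earliest pos)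
  let first := (PySem.List.enumerate flat 0).reverse.foldl (fun d p => d.insert p.2 p.1) PySem.Dict.empty
  -- sorted(first, key=first.get)
  let order := PySem.List.sorted first.keys (fun k => first.getD k 0) false
  -- for i, ndx in enumerate(order): mapuniq[ndx] = i
  ((PySem.List.enumerate order 0).foldl (fun d p => d.insert p.2 p.1) PySem.Dict.empty).items

-- ===== PRECONDITION & SPEC =====
def Spec_cadence_helper3 (mapping : List (String × List (List Int))) (out : List (Int × Int)) : Prop := out = cadence_helper3_alt mapping
instance (mapping : List (String × List (List Int))) (out : List (Int × Int)) : Decidable (Spec_cadence_helper3 mapping out) := by unfold Spec_cadence_helper3; infer_instance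

-- ===== CLAIM (what is proved, stated in full; the proofs are below) =====
def Claim_equal_cadence_helper3 : Prop := ∀ (mapping : List (String × List (List Int))), Dom_cadence_helper3 mapping → Spec_cadence_helper3 mapping (cadence_helper3 mapping)

-- ===== LEMMAS AND PROOFS =====

-- A's loop after consuming the flat list xs: items are the first occurrences numbered in order,
-- and the counter is the number of distinct elements seen.
theorem cadFold_spec (xs : List Int) :
    (xs.foldl cadStepA (PySem.Dict.empty, 0)).1.items
      = (PySem.List.enumerate (PySem.List.dedup xs) 0).map (fun p => (p.2, p.1))
    ∧ (xs.foldl cadStepA (PySem.Dict.empty, 0)).2 = ((PySem.List.dedup xs).length : Int) := by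
  induction xs using List.reverseRecOn with
  | nil => constructor <;> rfl
  | append_singleton xs x ih =>
    obtain ⟨hitems, hcnt⟩ := ih
    have hkeys : (xs.foldl cadStepA (PySem.Dict.empty, 0)).1.keys = PySem.List.dedup xs := by
      show (xs.foldl cadStepA (PySem.Dict.empty, 0)).1.items.map (fun p => p.1) = _
      rw [hitems]
      simp [List.map_map, Function.comp_def, PySem.List.map_snd_enumerate]
    have hmem : ((xs.foldl cadStepA (PySem.Dict.empty, 0)).1.contains x = true) ↔ x ∈ PySem.List.dedup xs := by
      rw [PySem.Dict.contains_iff_mem_keys, hkeys]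
    rw [List.foldl_append, List.foldl_cons, List.foldl_nil]
    by_cases hx : x ∈ PySem.List.dedup xs
    · have hc : (xs.foldl cadStepA (PySem.Dict.empty, 0)).1.contains x = true := hmem.mpr hx
      have hded : PySem.List.dedup (xs ++ [x]) = PySem.List.dedup xs := by
        simp only [PySem.List.dedup_eq_ofList, PySem.Set.ofList_append_singleton]
        exact PySem.Set.add_of_mem (by simpa [PySem.List.dedup_eq_ofList] using hx)
      simp only [cadStepA, hc, if_pos]
      rw [hded]; exact ⟨hitems, hcnt⟩
    · have hc : (xs.foldl cadStepA (PySem.Dict.empty, 0)).1.contains x = false := by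
        cases h : (xs.foldl cadStepA (PySem.Dict.empty, 0)).1.contains x
        · rfl
        · exact absurd (hmem.mp h) hx
      have hded : PySem.List.dedup (xs ++ [x]) = PySem.List.dedup xs ++ [x] := by
        simp only [PySem.List.dedup_eq_ofList, PySem.Set.ofList_append_singleton]
        exact PySem.Set.add_of_not_mem (by simpa [PySem.List.dedup_eq_ofList] using hx)
      simp only [cadStepA, hc, Bool.false_eq_true, if_false]
      constructor
      · rw [PySem.Dict.items_insert_of_not_contains _ _ hc, hitems, hded,
          PySem.List.enumerate_append]
        simp [PySem.List.enumerate, hcnt]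
      · have := congrArg List.length hded
        simp only [PySem.List.dedup_eq_ofList, List.length_append, List.length_cons,
          List.length_nil] at this
        simp [hcnt, PySem.List.dedup_eq_ofList, this]

-- an overwrite loop 'for p in l: d[p.2] = p.1' ends with the LAST matching pair's value
theorem getD_foldl_insert_pairs (l : List (Int × Int)) (d : PySem.Dict Int Int) (k d0 : Int) :
    (l.foldl (fun d p => d.insert p.2 p.1) d).getD k d0
      = ((l.filter (fun p => p.2 == k)).getLast?).elim (d.getD k d0) (fun p => p.1) := by
  induction l using List.reverseRecOn with
  | nil => simp
  | append_singleton l p ih =>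
    rw [List.foldl_append, List.foldl_cons, List.foldl_nil, PySem.Dict.getD_insert,
      List.filter_append]
    by_cases hk : p.2 = k
    · simp [hk]
    · have : (p.2 == k) = false := by simp [hk]
      simp [this, Ne.symm hk, ih]

-- head of the filtered enumeration = first occurrence position
theorem head_filter_enumerate (xs : List Int) (s k : Int) (h : k ∈ xs) :
    ((PySem.List.enumerate xs s).filter (fun p => p.2 == k)).head? = some (s + (xs.idxOf k : Int), k) := by
  induction xs generalizing s with
  | nil => cases h
  | cons x t ih =>
    rw [PySem.List.enumerate_cons]
    by_cases hx : x = k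
    · subst hx
      simp [List.idxOf_cons_self]
    · have hk : k ∈ t := by
        rcases List.mem_cons.mp h with h' | h'
        · exact absurd h'.symm hx
        · exact h'
      have hb : (x == k) = false := by simp [hx]
      rw [List.filter_cons]
      simp only [hb, Bool.false_eq_true, if_false]
      rw [ih (s + 1) hk, List.idxOf_cons]
      simp only [hb, cond_false, Option.some.injEq, Prod.mk.injEq, and_true]
      push_cast
      ring

-- the reverse overwrite pass maps each present index to its first occurrence position
theorem getD_first (flat : List Int) (k : Int) (h : k ∈ flat) :
    ((PySem.List.enumerate flat 0).reverse.foldl (fun d p => d.insert p.2 p.1) PySem.Dict.empty).getD k 0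
      = (flat.idxOf k : Int) := by
  rw [getD_foldl_insert_pairs, List.filter_reverse, List.getLast?_reverse,
    head_filter_enumerate flat 0 k h]
  simp

-- the keys of the reverse pass are the distinct indices (in reverse-first-occurrence order)
theorem keys_first (flat : List Int) :
    ((PySem.List.enumerate flat 0).reverse.foldl (fun d p => d.insert p.2 p.1) PySem.Dict.empty).keys
      = PySem.List.dedup flat.reverse := by
  have h := PySem.Dict.keys_foldl_insert_key (ν := Int)
      ((PySem.List.enumerate flat 0).reverse) (fun p => p.2) (fun _ p => p.1) PySem.Dict.empty
  refine h.trans ?_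
  simp only [PySem.Dict.keys_empty, List.map_reverse, PySem.List.map_snd_enumerate,
    PySem.List.dedup_eq_ofList]
  rw [PySem.Set.ofList_eq_foldl]
  rfl

-- along the dedup order, first occurrence indices strictly increase
theorem pairwise_idxOf_dedup (xs : List Int) :
    (PySem.List.dedup xs).Pairwise (fun a b => xs.idxOf a < xs.idxOf b) := by
  induction xs using List.reverseRecOn with
  | nil => simp [PySem.List.dedup_eq_ofList, PySem.Set.ofList]
  | append_singleton xs x ih =>
    have hmemd : ∀ a, a ∈ PySem.List.dedup xs → a ∈ xs := fun a ha => (PySem.List.mem_dedup _ _).mp ha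
    by_cases hx : x ∈ xs
    · have hded : PySem.List.dedup (xs ++ [x]) = PySem.List.dedup xs := by
        simp only [PySem.List.dedup_eq_ofList, PySem.Set.ofList_append_singleton]
        exact PySem.Set.add_of_mem (by simpa using hx)
      rw [hded]
      refine ih.imp_of_mem ?_
      intro a b ha hb hab
      rw [List.idxOf_append, if_pos (hmemd a ha), List.idxOf_append, if_pos (hmemd b hb)]
      exact hab
    · have hded : PySem.List.dedup (xs ++ [x]) = PySem.List.dedup xs ++ [x] := by
        simp only [PySem.List.dedup_eq_ofList, PySem.Set.ofList_append_singleton]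
        exact PySem.Set.add_of_not_mem (by simpa using hx)
      rw [hded, List.pairwise_append]
      refine ⟨?_, List.pairwise_singleton _ _, ?_⟩
      · refine ih.imp_of_mem ?_
        intro a b ha hb hab
        rw [List.idxOf_append, if_pos (hmemd a ha), List.idxOf_append, if_pos (hmemd b hb)]
        exact hab
      · intro a ha b hb
        have hb' : b = x := by simpa using hb
        subst hb'
        rw [List.idxOf_append, if_pos (hmemd a ha), List.idxOf_append, if_neg hx]
        have := List.idxOf_lt_length_iff.mpr (hmemd a ha)
        omega

-- sorting the unique indices by first occurrence position yields the dedup order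
theorem order_eq (flat : List Int) :
    PySem.List.sorted (PySem.List.dedup flat.reverse)
      (fun k => ((PySem.List.enumerate flat 0).reverse.foldl
          (fun d p => d.insert p.2 p.1) PySem.Dict.empty).getD k 0) false
      = PySem.List.dedup flat := by
  apply PySem.List.sorted_eq_of_perm_of_pairwise_lt
  · rw [List.perm_ext_iff_of_nodup (PySem.List.nodup_dedup _) (PySem.List.nodup_dedup _)]
    intro a
    simp
  · refine (pairwise_idxOf_dedup flat).imp_of_mem ?_
    intro a b ha hb hab
    have ha' : a ∈ flat := (PySem.List.mem_dedup _ _).mp ha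
    have hb' : b ∈ flat := by simpa using (PySem.List.mem_dedup _ _).mp hb
    rw [getD_first flat a ha', getD_first flat b hb']
    exact_mod_cast hab

-- ===== VERDICT (by name: the statement is the Claim_ definition above) =====
theorem cadence_helper3_spec : Claim_equal_cadence_helper3 := by
  intro mapping _
  unfold Spec_cadence_helper3
  simp only [cadence_helper3, cadence_helper3_alt]
  show (mapping.foldl
      (fun st sp => sp.2.foldl (fun st phrase => phrase.foldl cadStepA st) st)
      (PySem.Dict.empty, 0)).1.items = _
  rw [show (mapping.foldl
      (fun st sp => sp.2.foldl (fun st phrase => phrase.foldl cadStepA st) st)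
      (PySem.Dict.empty, 0))
    = ((mapping.map (fun sp => sp.2)).flatten.flatten.foldl cadStepA (PySem.Dict.empty, 0)) by
      rw [List.foldl_flatten, List.foldl_flatten, List.foldl_map]]
  rw [(cadFold_spec _).1]
  conv_rhs => rw [keys_first, order_eq]
  have h := PySem.Dict.items_foldl_insert_fresh
      (PySem.List.enumerate (PySem.List.dedup ((mapping.map (fun sp => sp.2)).flatten).flatten) 0)
      (fun p => p.2) (fun p => p.1) PySem.Dict.empty
      (fun a _ => PySem.Dict.contains_empty _)
      (by rw [PySem.List.map_snd_enumerate]; exact PySem.List.nodup_dedup _)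
  exact h.symm.trans (by simp)
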